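-- pv_equiv track=rewrite | github.com/HaydenInEdinburgh/LintCode | 1907_array_game.py | arrayGame
-- ===== SOURCE A (Python) =====
-- from typing import (
--     List,
-- )
--
-- def arrayGame(arr: List[int]) -> int:
--     # write your code here
--     if not arr:
--         return 0
--     minimum = min(arr)
--
--     step = 0
--     for n in arr:
--         step += (n-minimum)
--
--     return step
-- ===== SOURCE B (Python) =====
-- from typing import (
--     List,
-- )
--
-- def arrayGame(arr: List[int]) -> int:
--     # single pass: maintain the running minimum and the answer, retroactively
--     # correcting all previously-seen elements when a new minimum appears
--     ans = 0
--     cur_min = None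
--     seen = 0
--     for n in arr:
--         if cur_min is None:
--             cur_min = n
--         elif n < cur_min:
--             ans += (cur_min - n) * seen
--             cur_min = n
--         else:
--             ans += n - cur_min
--         seen += 1
--     return ans
-- ===== Notes on version B (the rewrite author's own statement) =====
-- stated objective: alternative
-- what changed: Replaces A's two passes (min() first, then an accumulation loop) with a single streaming pass that maintains the running minimum and retroactively adds (old_min - n) * seen when a new minimum appears.
import Mathlib
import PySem

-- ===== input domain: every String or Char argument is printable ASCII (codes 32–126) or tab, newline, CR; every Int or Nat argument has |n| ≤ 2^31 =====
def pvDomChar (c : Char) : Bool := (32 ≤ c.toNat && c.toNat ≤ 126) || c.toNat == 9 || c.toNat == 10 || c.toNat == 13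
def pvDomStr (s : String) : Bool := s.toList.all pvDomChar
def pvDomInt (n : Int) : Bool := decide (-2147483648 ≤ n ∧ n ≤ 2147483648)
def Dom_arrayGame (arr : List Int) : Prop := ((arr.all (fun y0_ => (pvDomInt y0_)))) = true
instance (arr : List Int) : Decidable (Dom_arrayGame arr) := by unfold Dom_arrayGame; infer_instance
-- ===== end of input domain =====

-- B replaces A's two passes (min first, then a subtraction loop) with one streaming pass
-- that keeps the running minimum and retroactively corrects the answer when it drops.
-- ===== PORT A =====
def arrayGame (arr : List Int) : Int :=
  if arr = [] then 0
  else
    match PySem.List.min? arr (fun x => x) with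
    | none => 0  -- unreachable: arr ≠ []
    | some minimum => arr.foldl (fun step n => step + (n - minimum)) 0

-- ===== PORT B =====
-- one step of B's loop over state (ans, cur_min, seen)
def arrayGameStep (st : Int × Option Int × Int) (n : Int) : Int × Option Int × Int :=
  match st with
  | (ans, none, seen) => (ans, some n, seen + 1)
  | (ans, some m, seen) =>
    if n < m then (ans + (m - n) * seen, some n, seen + 1)
    else (ans + (n - m), some m, seen + 1)

def arrayGame_alt (arr : List Int) : Int :=
  (arr.foldl arrayGameStep (0, none, 0)).1

-- ===== PRECONDITION & SPEC =====
def Spec_arrayGame (arr : List Int) (out : Int) : Prop := out = arrayGame_alt arr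
instance (arr : List Int) (out : Int) : Decidable (Spec_arrayGame arr out) := by unfold Spec_arrayGame; infer_instance

-- ===== CLAIM (what is proved, stated in full; the proofs are below) =====
def Claim_equal_arrayGame : Prop := ∀ (arr : List Int), Dom_arrayGame arr → Spec_arrayGame arr (arrayGame arr)

-- ===== LEMMAS AND PROOFS =====

-- A's accumulation loop equals sum - minimum * length
lemma foldl_sub_min (m : Int) : ∀ (arr : List Int) (c : Int),
    arr.foldl (fun step n => step + (n - m)) c = c + arr.sum - m * arr.length := by
  intro arr
  induction arr with
  | nil => intro c; simp
  | cons h t ih =>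
    intro c
    simp only [List.foldl_cons, List.sum_cons, List.length_cons, ih]
    push_cast
    ring

-- invariant of B's streaming loop from a live state
lemma alt_inv : ∀ (t : List Int) (ans m seen : Int),
    (t.foldl arrayGameStep (ans, some m, seen)).1
      = ans + seen * (m - t.foldl min m) + t.sum - (t.foldl min m) * t.length := by
  intro t
  induction t with
  | nil => intro ans m seen; simp
  | cons n t ih =>
    intro ans m seen
    simp only [List.foldl_cons, arrayGameStep, List.sum_cons, List.length_cons]
    by_cases h : n < m
    · rw [if_pos h, ih]
      have hmin : min m n = n := min_eq_right h.le
      rw [hmin]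
      push_cast; ring
    · rw [if_neg h, ih]
      have hmin : min m n = m := min_eq_left (not_lt.mp h)
      rw [hmin]
      push_cast; ring

-- ===== VERDICT (by name: the statement is the Claim_ definition above) =====
theorem arrayGame_spec : Claim_equal_arrayGame := by
  intro arr _
  unfold Spec_arrayGame arrayGame arrayGame_alt
  cases arr with
  | nil => rfl
  | cons h t =>
    rw [if_neg (by simp), PySem.List.min?_id_cons]
    simp only [List.foldl_cons]
    rw [foldl_sub_min]
    simp only [arrayGameStep]
    rw [alt_inv]
    push_cast
    ring
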